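-- pv_equiv track=rewrite | github.com/opalgeorgii/autoconfigcopier | auto_configs_copier.py | _vdf_tokenize
-- ===== SOURCE A (Python) =====
-- class VDFError(Exception):
--     pass
--
-- def _vdf_tokenize(text: str) -> list[str]:
--     tokens: list[str] = []
--     i = 0
--     length = len(text)
--
--     while i < length:
--         ch = text[i]
--
--         if ch.isspace():
--             i += 1
--             continue
--
--         if ch == "/" and i + 1 < length and text[i + 1] == "/":
--             i += 2
--             while i < length and text[i] not in "\r\n":
--                 i += 1
--             continue
--
--         if ch in "{}":
--             tokens.append(ch)
--             i += 1
--             continue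
--
--         if ch == '"':
--             i += 1
--             chars: list[str] = []
--             while i < length:
--                 curr = text[i]
--                 if curr == "\\" and i + 1 < length:
--                     chars.append(text[i + 1])
--                     i += 2
--                     continue
--                 if curr == '"':
--                     i += 1
--                     break
--                 chars.append(curr)
--                 i += 1
--             else:
--                 raise VDFError("Unterminated quoted string in VDF.")
--
--             tokens.append("".join(chars))
--             continue
--
--         start = i
--         while i < length and not text[i].isspace() and text[i] not in '{}':
--             i += 1
--         tokens.append(text[start:i])
--
--     return tokens
-- ===== SOURCE B (Python) =====
-- class VDFError(Exception):
--     pass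
--
-- def _vdf_tokenize(text: str) -> list[str]:
--     # Single-pass DFA over the characters (no index arithmetic or inner loops).
--     tokens: list[str] = []
--     state = "start"
--     buf: list[str] = []
--     for c in text:
--         if state == "start":
--             if c.isspace():
--                 pass
--             elif c in "{}":
--                 tokens.append(c)
--             elif c == '"':
--                 buf = []
--                 state = "quote"
--             elif c == "/":
--                 state = "slash"
--             else:
--                 buf = [c]
--                 state = "bare"
--         elif state == "slash":
--             if c == "/":
--                 state = "comment"
--             elif c.isspace():
--                 tokens.append("/")
--                 state = "start"
--             elif c in "{}":
--                 tokens.append("/")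
--                 tokens.append(c)
--                 state = "start"
--             else:
--                 buf = ["/", c]
--                 state = "bare"
--         elif state == "comment":
--             if c in "\r\n":
--                 state = "start"
--         elif state == "quote":
--             if c == "\\":
--                 state = "qesc"
--             elif c == '"':
--                 tokens.append("".join(buf))
--                 state = "start"
--             else:
--                 buf.append(c)
--         elif state == "qesc":
--             buf.append(c)
--             state = "quote"
--         else:  # bare
--             if c.isspace():
--                 tokens.append("".join(buf))
--                 state = "start"
--             elif c in "{}":
--                 tokens.append("".join(buf))
--                 tokens.append(c)
--                 state = "start"
--             else:
--                 buf.append(c)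
--     if state == "bare":
--         tokens.append("".join(buf))
--     elif state == "slash":
--         tokens.append("/")
--     elif state in ("quote", "qesc"):
--         raise VDFError("Unterminated quoted string in VDF.")
--     return tokens
-- ===== Notes on version B (the rewrite author's own statement) =====
-- stated objective: alternative
-- what changed: A's index-based while-loop with three nested inner loops and comment-lookahead is replaced by a single character-at-a-time six-state DFA (start/slash/comment/quote/escape/bare) with no index arithmetic.
import Mathlib
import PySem

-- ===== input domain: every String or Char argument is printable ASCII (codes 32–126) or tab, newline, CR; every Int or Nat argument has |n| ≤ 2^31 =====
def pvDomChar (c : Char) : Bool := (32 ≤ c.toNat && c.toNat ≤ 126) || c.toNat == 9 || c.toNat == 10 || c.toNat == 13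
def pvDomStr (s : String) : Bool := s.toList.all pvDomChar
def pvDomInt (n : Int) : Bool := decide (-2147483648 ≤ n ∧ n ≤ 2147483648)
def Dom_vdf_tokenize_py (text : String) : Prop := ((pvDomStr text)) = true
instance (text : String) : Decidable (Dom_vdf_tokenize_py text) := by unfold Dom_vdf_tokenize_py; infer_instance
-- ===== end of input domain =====

-- B replaces A's index-juggling while-loop (three nested inner loops plus lookahead)
-- by a single character-at-a-time DFA pass; same return value; objective: alternative.

-- ===== PORT A =====
-- inner comment loop: `while i < length and text[i] not in "\r\n": i += 1` (returns the suffix at i)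
def skipCommentA : List Char → List Char
  | [] => []
  | c :: r => if c = '\r' ∨ c = '\n' then c :: r else skipCommentA r

-- inner quoted-string loop; `none` is exactly Python's `raise VDFError` (unterminated string);
-- a final lone backslash falls through the `i + 1 < length` test and is appended literally, as in A
def scanQuoteA (buf : List Char) : List Char → Option (String × List Char)
  | [] => none
  | '\\' :: d :: r => scanQuoteA (buf ++ [d]) r
  | '"' :: r => some (String.ofList buf, r)
  | c :: r => scanQuoteA (buf ++ [c]) r

def isBareStopA (c : Char) : Bool := PySem.Chars.isspace c || c = '{' || c = '}'

-- the bare-token loop `while i < length and not text[i].isspace() and text[i] not in '{}'`: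
-- the characters it walks over (the slice text[start:i]) …
def takeBareA : List Char → List Char
  | [] => []
  | c :: r => if isBareStopA c then [] else c :: takeBareA r

-- … and the suffix where it stops
def dropBareA : List Char → List Char
  | [] => []
  | c :: r => if isBareStopA c then c :: r else dropBareA r

-- termination facts for A's outer loop (each `continue` strictly consumes input)
theorem skipCommentA_length_le (cs : List Char) : (skipCommentA cs).length ≤ cs.length := by
  induction cs with
  | nil => simp [skipCommentA]
  | cons c r ih =>
    simp only [skipCommentA]; split
    · simp
    · simp only [List.length_cons]; omega

theorem dropBareA_length_le (cs : List Char) : (dropBareA cs).length ≤ cs.length := by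
  induction cs with
  | nil => simp [dropBareA]
  | cons c r ih =>
    simp only [dropBareA]; split
    · simp
    · simp only [List.length_cons]; omega

theorem scanQuoteA_length_lt : ∀ (n : Nat) (cs : List Char), cs.length ≤ n →
    ∀ (buf : List Char) (s : String) (rest : List Char),
    scanQuoteA buf cs = some (s, rest) → rest.length < cs.length := by
  intro n
  induction n with
  | zero =>
    intro cs hcs buf s rest h
    have hnil : cs = [] := by cases cs <;> simp_all
    subst hnil; simp [scanQuoteA] at h
  | succ n ih =>
    intro cs hcs buf s rest h
    rw [scanQuoteA.eq_def] at h
    split at h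
    · simp at h
    · rename_i d r
      have := ih r (by simp at hcs; omega) _ _ _ h
      simp only [List.length_cons]; omega
    · rename_i r
      cases h; simp
    · rename_i c r hx1 hx2
      have := ih r (by simp at hcs; omega) _ _ _ h
      simp only [List.length_cons]; omega

-- A's outer while-loop: one recursive call per `continue`
def vdfTokA : List Char → List String
  | [] => []
  | c :: r =>
    if PySem.Chars.isspace c then vdfTokA r
    else if c = '/' ∧ r.head? = some '/' then vdfTokA (skipCommentA r.tail)
    else if c = '{' ∨ c = '}' then String.ofList [c] :: vdfTokA r
    else if c = '"' then
      match h : scanQuoteA [] r with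
      | some (s, rest) => s :: vdfTokA rest
      | none => []          -- Python raises VDFError here; excluded by Pre_
    else String.ofList (c :: takeBareA r) :: vdfTokA (dropBareA r)
termination_by cs => cs.length
decreasing_by
  · simp
  · have h1 := skipCommentA_length_le r.tail
    have : r.tail.length ≤ r.length := by cases r <;> simp
    simp; omega
  · simp
  · have := scanQuoteA_length_lt r.length r le_rfl [] s rest h
    simp; omega
  · have := dropBareA_length_le r
    simp; omega

def vdf_tokenize_py (text : String) : List String := vdfTokA text.toList

-- ===== PORT B =====
inductive BSt where
  | start | slash | comment | quote | qesc | bare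
deriving DecidableEq, Repr

-- B's for-loop as recursion over the characters; `buf` is live only in quote/qesc/bare
-- (the dead occurrences pass []).  The [] case is the code after the for-loop;
-- B raises VDFError there in states quote/qesc (excluded by Pre_), modelled as [].
def vdfTokB (st : BSt) (buf : List Char) : List Char → List String
  | [] =>
    match st with
    | .bare => [String.ofList buf]
    | .slash => ["/"]
    | _ => []
  | c :: r =>
    match st with
    | .start =>
      if PySem.Chars.isspace c then vdfTokB .start [] r
      else if c = '{' ∨ c = '}' then String.ofList [c] :: vdfTokB .start [] r
      else if c = '"' then vdfTokB .quote [] r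
      else if c = '/' then vdfTokB .slash [] r
      else vdfTokB .bare [c] r
    | .slash =>
      if c = '/' then vdfTokB .comment [] r
      else if PySem.Chars.isspace c then "/" :: vdfTokB .start [] r
      else if c = '{' ∨ c = '}' then "/" :: String.ofList [c] :: vdfTokB .start [] r
      else vdfTokB .bare ['/', c] r
    | .comment =>
      if c = '\r' ∨ c = '\n' then vdfTokB .start [] r else vdfTokB .comment [] r
    | .quote =>
      if c = '\\' then vdfTokB .qesc buf r
      else if c = '"' then String.ofList buf :: vdfTokB .start [] r
      else vdfTokB .quote (buf ++ [c]) r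
    | .qesc => vdfTokB .quote (buf ++ [c]) r
    | .bare =>
      if PySem.Chars.isspace c then String.ofList buf :: vdfTokB .start [] r
      else if c = '{' ∨ c = '}' then String.ofList buf :: String.ofList [c] :: vdfTokB .start [] r
      else vdfTokB .bare (buf ++ [c]) r

def vdf_tokenize_py_alt (text : String) : List String := vdfTokB .start [] text.toList

-- ===== PRECONDITION & SPEC =====
-- Pre_ excludes exactly the inputs on which A raises VDFError: texts that END inside a
-- quoted string (a '"' at a token-start position — not inside a comment or a bare token —
-- with no matching closing '"', escapes counted).  Whether a '"' opens a string depends on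
-- its context, so preCtx computes just that context (a 6-value DFA state, no tokens, no
-- output value of the programs) and Pre_ says the final context is not in-string.
inductive PCtx where
  | out | slash | comment | quote | qesc | bare
deriving DecidableEq

def preCtx (st : PCtx) : List Char → PCtx
  | [] => st
  | c :: r =>
    match st with
    | .out =>
      if PySem.Chars.isspace c then preCtx .out r
      else if c = '{' ∨ c = '}' then preCtx .out r
      else if c = '"' then preCtx .quote r
      else if c = '/' then preCtx .slash r
      else preCtx .bare r
    | .slash =>
      if c = '/' then preCtx .comment r
      else if PySem.Chars.isspace c then preCtx .out r
      else if c = '{' ∨ c = '}' then preCtx .out r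
      else preCtx .bare r
    | .comment =>
      if c = '\r' ∨ c = '\n' then preCtx .out r else preCtx .comment r
    | .quote =>
      if c = '\\' then preCtx .qesc r
      else if c = '"' then preCtx .out r
      else preCtx .quote r
    | .qesc => preCtx .quote r
    | .bare =>
      if PySem.Chars.isspace c ∨ c = '{' ∨ c = '}' then preCtx .out r
      else preCtx .bare r

def Pre_vdf_tokenize_py (text : String) : Prop :=
  preCtx .out text.toList ≠ .quote ∧ preCtx .out text.toList ≠ .qesc
instance (text : String) : Decidable (Pre_vdf_tokenize_py text) := by
  unfold Pre_vdf_tokenize_py; infer_instance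

def pvWitness_vdf_tokenize_py : String := "\"k v\" { a\\tb } // c"

def Spec_vdf_tokenize_py (text : String) (out : List String) : Prop := out = vdf_tokenize_py_alt text
instance (text : String) (out : List String) : Decidable (Spec_vdf_tokenize_py text out) := by
  unfold Spec_vdf_tokenize_py; infer_instance

-- ===== CLAIM (what is proved, stated in full; the proofs are below) =====
def Claim_equal_vdf_tokenize_py : Prop := ∀ (text : String), Dom_vdf_tokenize_py text → Pre_vdf_tokenize_py text → Spec_vdf_tokenize_py text (vdf_tokenize_py text)

-- ===== LEMMAS AND PROOFS =====

theorem scanQuoteA_other (buf : List Char) (c : Char) (r : List Char)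
    (hb : c ≠ '\\') (hq : c ≠ '"') :
    scanQuoteA buf (c :: r) = scanQuoteA (buf ++ [c]) r := by
  rw [scanQuoteA.eq_def]
  split
  · rename_i heq; simp at heq
  · rename_i d' r' heq
    have hc : c = '\\' := by simp at heq; exact heq.1
    exact absurd hc hb
  · rename_i r' heq
    have hc : c = '"' := by simp at heq; exact heq.1
    exact absurd hc hq
  · rename_i c' r' hx1 hx2 heq
    have hc : c' = c := by simp at heq; exact heq.1.symm
    have hr : r' = r := by simp at heq; exact heq.2.symm
    rw [hc, hr]

theorem vdfTokB_comment (cs : List Char) :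
    vdfTokB .comment [] cs = vdfTokB .start [] (skipCommentA cs) := by
  induction cs with
  | nil => simp [vdfTokB, skipCommentA]
  | cons c r ih =>
    by_cases hc : c = '\r' ∨ c = '\n'
    · rcases hc with h | h <;> subst h <;>
        simp [vdfTokB, skipCommentA, PySem.Chars.isspace]
    · simp [vdfTokB, skipCommentA, hc, ih]

theorem vdfTokB_quote : ∀ (n : Nat) (cs : List Char), cs.length ≤ n → ∀ (buf : List Char),
    vdfTokB .quote buf cs =
      (match scanQuoteA buf cs with
       | some (s, rest) => s :: vdfTokB .start [] rest
       | none => []) := by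
  intro n
  induction n with
  | zero =>
    intro cs hcs buf
    have hnil : cs = [] := by cases cs <;> simp_all
    subst hnil; simp [vdfTokB, scanQuoteA]
  | succ n ih =>
    intro cs hcs buf
    cases cs with
    | nil => simp [vdfTokB, scanQuoteA]
    | cons c r =>
      by_cases hb : c = '\\'
      · subst hb
        cases r with
        | nil => simp [vdfTokB, scanQuoteA]
        | cons d r2 =>
          have ihq := ih r2 (by simp at hcs; omega) (buf ++ [d])
          simp [vdfTokB, scanQuoteA, ihq]
      · by_cases hq : c = '"'
        · subst hq; simp [vdfTokB, scanQuoteA]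
        · have ihq := ih r (by simp at hcs; omega) (buf ++ [c])
          rw [scanQuoteA_other buf c r hb hq]
          simp [vdfTokB, hb, hq, ihq]

theorem vdfTokB_bare : ∀ (cs : List Char) (buf : List Char),
    vdfTokB .bare buf cs =
      String.ofList (buf ++ takeBareA cs) :: vdfTokB .start [] (dropBareA cs) := by
  intro cs
  induction cs with
  | nil => intro buf; simp [vdfTokB, takeBareA, dropBareA]
  | cons c r ih =>
    intro buf
    by_cases hs : PySem.Chars.isspace c = true
    · have hstop : isBareStopA c = true := by simp [isBareStopA, hs]
      simp [vdfTokB, takeBareA, dropBareA, hs, hstop]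
    · by_cases hbr : c = '{' ∨ c = '}'
      · have hstop : isBareStopA c = true := by
          rcases hbr with h | h <;> simp [isBareStopA, h]
        simp [vdfTokB, takeBareA, dropBareA, hs, hbr, hstop]
      · have hstop : isBareStopA c = false := by
          simp [isBareStopA, hs]
          constructor
          · intro h; exact absurd (Or.inl h) hbr
          · intro h; exact absurd (Or.inr h) hbr
        simp [vdfTokB, takeBareA, dropBareA, hs, hbr, hstop, ih]

theorem vdfTokB_slash (cs : List Char) (h : cs.head? ≠ some '/') :
    vdfTokB .slash [] cs =
      String.ofList ('/' :: takeBareA cs) :: vdfTokB .start [] (dropBareA cs) := by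
  cases cs with
  | nil => simp [vdfTokB, takeBareA, dropBareA]
  | cons c r =>
    have hne : c ≠ '/' := by simp at h; exact h
    by_cases hs : PySem.Chars.isspace c = true
    · have hstop : isBareStopA c = true := by simp [isBareStopA, hs]
      simp [vdfTokB, takeBareA, dropBareA, hne, hs, hstop]
    · by_cases hbr : c = '{' ∨ c = '}'
      · have hstop : isBareStopA c = true := by
          rcases hbr with h | h <;> simp [isBareStopA, h]
        simp [vdfTokB, takeBareA, dropBareA, hne, hs, hbr, hstop]
      · have hstop : isBareStopA c = false := by
          simp [isBareStopA, hs]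
          constructor
          · intro h; exact absurd (Or.inl h) hbr
          · intro h; exact absurd (Or.inr h) hbr
        simp [vdfTokB, takeBareA, dropBareA, hne, hs, hbr, hstop, vdfTokB_bare]

theorem vdfTok_main : ∀ (n : Nat) (cs : List Char), cs.length ≤ n →
    vdfTokA cs = vdfTokB .start [] cs := by
  intro n
  induction n with
  | zero =>
    intro cs hcs
    have hnil : cs = [] := by cases cs <;> simp_all
    subst hnil; simp [vdfTokA, vdfTokB]
  | succ n ih =>
    intro cs hcs
    cases cs with
    | nil => simp [vdfTokA, vdfTokB]
    | cons c r =>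
      simp only [List.length_cons] at hcs
      by_cases hs : PySem.Chars.isspace c = true
      · simp [vdfTokA, vdfTokB, hs, ih r (by omega)]
      · by_cases hcom : c = '/' ∧ r.head? = some '/'
        · obtain ⟨hc, hh⟩ := hcom
          subst hc
          cases r with
          | nil => simp at hh
          | cons d r2 =>
            have hd : d = '/' := by simp at hh; exact hh
            subst hd
            have hskip : (skipCommentA r2).length ≤ r2.length := skipCommentA_length_le r2
            have := ih (skipCommentA r2) (by simp at hcs; omega)
            simp [vdfTokA, vdfTokB, hs, vdfTokB_comment, this]
        · by_cases hbr : c = '{' ∨ c = '}'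
          · have hns : c ≠ '/' := by rcases hbr with h | h <;> subst h <;> decide
            simp [vdfTokA, vdfTokB, hs, hcom, hbr, ih r (by omega)]
          · by_cases hq : c = '"'
            · subst hq
              have hqb := vdfTokB_quote r.length r le_rfl []
              cases hsq : scanQuoteA [] r with
              | none =>
                simp [vdfTokA, vdfTokB, hs, hqb, hsq]
                split
                · rename_i s' rest' heq; rw [hsq] at heq; cases heq
                · rfl
              | some p =>
                obtain ⟨s, rest⟩ := p
                have hlt := scanQuoteA_length_lt r.length r le_rfl [] s rest hsq
                have hih := ih rest (by omega)
                simp [vdfTokA, vdfTokB, hs, hqb, hsq]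
                split
                · rename_i s' rest' heq
                  rw [hsq] at heq
                  cases heq
                  rw [hih]
                · rename_i heq; rw [hsq] at heq; cases heq
            · by_cases hsl : c = '/'
              · subst hsl
                have hh : r.head? ≠ some '/' := by
                  intro hcon; exact hcom ⟨rfl, hcon⟩
                have hdl := dropBareA_length_le r
                have := ih (dropBareA r) (by omega)
                simp [vdfTokA, vdfTokB, hs, hh, vdfTokB_slash r hh, this]
              · have hdl := dropBareA_length_le r
                have := ih (dropBareA r) (by omega)
                simp [vdfTokA, vdfTokB, hs, hbr, hq, hsl, vdfTokB_bare, this]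

-- ===== VERDICT (by name: the statement is the Claim_ definition above) =====
theorem vdf_tokenize_py_spec : Claim_equal_vdf_tokenize_py := by
  intro text _ _
  unfold Spec_vdf_tokenize_py vdf_tokenize_py vdf_tokenize_py_alt
  exact vdfTok_main text.toList.length text.toList le_rfl
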